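-- pv_equiv track=rewrite | github.com/simaozuzarte/Jobshop_optimization | jsp_solver.py | compute_time_bounds
-- ===== SOURCE A (Python) =====
-- def compute_time_bounds(n_jobs, n_machines, jobs, p):
--     """Compute time bounds for the instance."""
--     # Lower bound: maximum machine workload or maximum job length
--     max_job_length = max(sum(duration for _, duration in jobs[j]) for j in range(n_jobs))
--     max_machine_load = 0
--     for m in range(n_machines):
--         machine_load = sum(p[(j, m)] for j in range(n_jobs) if (j, m) in p)
--         max_machine_load = max(max_machine_load, machine_load)
--
--     lower_bound = max(max_job_length, max_machine_load)
--
--     # Upper bound: sum of all processing times (trivial schedule)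
--     upper_bound = sum(p.values())
--
--     # Big-M for disjunctive constraints
--     big_M = upper_bound  # Conservative but valid
--
--     # Tighter Big-M: upper_bound - min_processing_time
--     if p:
--         min_processing = min(p.values())
--         tighter_big_M = upper_bound - min_processing
--     else:
--         tighter_big_M = upper_bound
--
--     return {
--         'lower_bound': lower_bound,
--         'upper_bound': upper_bound,
--         'big_M': big_M,
--         'tighter_big_M': tighter_big_M,
--         'max_job_length': max_job_length,
--         'max_machine_load': max_machine_load
--     }
-- ===== SOURCE B (Python) =====
-- def compute_time_bounds(n_jobs, n_machines, jobs, p):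
--     """Compute time bounds; machine loads built in one pass over p instead of a per-machine scan."""
--     load = {}
--     for (j, m), dur in p.items():
--         if 0 <= j < n_jobs and 0 <= m < n_machines:
--             load[m] = load.get(m, 0) + dur
--     max_machine_load = 0
--     for m in range(n_machines):
--         max_machine_load = max(max_machine_load, load.get(m, 0))
--     max_job_length = max(sum(duration for _, duration in row) for row in jobs[:n_jobs])
--     upper_bound = sum(p.values())
--     if p:
--         tighter_big_M = upper_bound - min(p.values())
--     else:
--         tighter_big_M = upper_bound
--     return {
--         'lower_bound': max(max_job_length, max_machine_load),
--         'upper_bound': upper_bound,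
--         'big_M': upper_bound,
--         'tighter_big_M': tighter_big_M,
--         'max_job_length': max_job_length,
--         'max_machine_load': max_machine_load,
--     }
-- ===== Notes on version B (the rewrite author's own statement) =====
-- stated objective: alternative
-- what changed: Machine loads are accumulated in a dictionary by one pass over p.items() (replacing the per-machine inner scan over all jobs with membership tests), and max_job_length is taken over the sliced job rows instead of indexed lookups.
import Mathlib
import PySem

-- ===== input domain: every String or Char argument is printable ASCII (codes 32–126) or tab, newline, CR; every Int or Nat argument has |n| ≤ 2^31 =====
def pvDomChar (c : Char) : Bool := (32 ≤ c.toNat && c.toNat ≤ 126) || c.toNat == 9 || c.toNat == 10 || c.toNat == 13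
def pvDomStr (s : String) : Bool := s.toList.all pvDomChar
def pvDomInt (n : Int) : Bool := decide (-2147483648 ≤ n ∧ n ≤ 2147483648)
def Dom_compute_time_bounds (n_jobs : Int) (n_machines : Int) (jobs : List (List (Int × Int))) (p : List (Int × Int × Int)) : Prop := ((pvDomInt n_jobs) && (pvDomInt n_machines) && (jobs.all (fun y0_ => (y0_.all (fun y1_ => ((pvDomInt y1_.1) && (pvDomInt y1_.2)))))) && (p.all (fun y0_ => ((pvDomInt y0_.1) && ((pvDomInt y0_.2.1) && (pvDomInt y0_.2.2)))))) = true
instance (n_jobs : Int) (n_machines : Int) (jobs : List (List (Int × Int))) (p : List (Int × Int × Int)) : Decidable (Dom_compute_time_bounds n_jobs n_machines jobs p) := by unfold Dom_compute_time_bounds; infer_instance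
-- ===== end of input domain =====

-- ===== PORT A =====
-- B changes the machine-load computation to a single dict-building pass over p; return-value equivalence proved on Pre_.
def ctb_rowSum (row : List (Int × Int)) : Int := (row.map (fun x => x.2)).sum

-- dict lookup p[(j, m)] on the association list (first match)
def ctb_lookup (p : List (Int × Int × Int)) (j m : Int) : Option Int :=
  (p.find? (fun e => e.1 == j && e.2.1 == m)).map (fun e => e.2.2)

def compute_time_bounds (n_jobs : Int) (n_machines : Int) (jobs : List (List (Int × Int))) (p : List (Int × Int × Int)) : List (String × Int) :=
  let max_job_length := (PySem.List.max? ((PySem.List.pyRange 0 n_jobs 1).map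
      (fun j => ctb_rowSum ((PySem.List.pyGet? jobs j).getD []))) (fun x => x)).getD 0
  let max_machine_load := (PySem.List.pyRange 0 n_machines 1).foldl (fun acc m =>
      max acc ((PySem.List.pyRange 0 n_jobs 1).foldl (fun s j =>
        match ctb_lookup p j m with
        | some v => s + v
        | none => s) 0)) 0
  let lower_bound := max max_job_length max_machine_load
  let upper_bound := (p.map (fun e => e.2.2)).sum
  let big_M := upper_bound
  let tighter_big_M :=
    if p ≠ [] then upper_bound - (PySem.List.min? (p.map (fun e => e.2.2)) (fun x => x)).getD 0
    else upper_bound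
  [("lower_bound", lower_bound), ("upper_bound", upper_bound), ("big_M", big_M),
   ("tighter_big_M", tighter_big_M), ("max_job_length", max_job_length),
   ("max_machine_load", max_machine_load)]

-- ===== PORT B =====
def ctb_load (n_jobs : Int) (n_machines : Int) (p : List (Int × Int × Int)) : PySem.Dict Int Int :=
  p.foldl (fun d e =>
    if 0 ≤ e.1 ∧ e.1 < n_jobs ∧ 0 ≤ e.2.1 ∧ e.2.1 < n_machines then
      d.insert e.2.1 (d.getD e.2.1 0 + e.2.2)
    else d) PySem.Dict.empty

def compute_time_bounds_alt (n_jobs : Int) (n_machines : Int) (jobs : List (List (Int × Int))) (p : List (Int × Int × Int)) : List (String × Int) :=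
  let load := ctb_load n_jobs n_machines p
  let max_machine_load := (PySem.List.pyRange 0 n_machines 1).foldl
      (fun acc m => max acc (load.getD m 0)) 0
  let max_job_length := (PySem.List.max?
      ((PySem.List.slice jobs (some 0) (some n_jobs)).map ctb_rowSum) (fun x => x)).getD 0
  let upper_bound := (p.map (fun e => e.2.2)).sum
  let tighter_big_M :=
    if p ≠ [] then upper_bound - (PySem.List.min? (p.map (fun e => e.2.2)) (fun x => x)).getD 0
    else upper_bound
  [("lower_bound", max max_job_length max_machine_load), ("upper_bound", upper_bound),
   ("big_M", upper_bound), ("tighter_big_M", tighter_big_M),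
   ("max_job_length", max_job_length), ("max_machine_load", max_machine_load)]

-- ===== PRECONDITION & SPEC =====
-- A raises ValueError when n_jobs < 1 (max over an empty generator) and IndexError when n_jobs > len(jobs);
-- the Nodup condition only rules out association lists that do not encode a Python dict (duplicate keys),
-- on which neither Python function is ever called.
def Pre_compute_time_bounds (n_jobs : Int) (n_machines : Int) (jobs : List (List (Int × Int))) (p : List (Int × Int × Int)) : Prop :=
  1 ≤ n_jobs ∧ n_jobs ≤ (jobs.length : Int) ∧ (p.map (fun e => (e.1, e.2.1))).Nodup
instance (n_jobs : Int) (n_machines : Int) (jobs : List (List (Int × Int))) (p : List (Int × Int × Int)) : Decidable (Pre_compute_time_bounds n_jobs n_machines jobs p) := by unfold Pre_compute_time_bounds; infer_instance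

def pvWitness_compute_time_bounds : Int × Int × (List (List (Int × Int))) × (List (Int × Int × Int)) :=
  (1, 1, [[(0, 3)]], [(0, 0, 3)])

def Spec_compute_time_bounds (n_jobs : Int) (n_machines : Int) (jobs : List (List (Int × Int))) (p : List (Int × Int × Int)) (out : List (String × Int)) : Prop := out = compute_time_bounds_alt n_jobs n_machines jobs p
instance (n_jobs : Int) (n_machines : Int) (jobs : List (List (Int × Int))) (p : List (Int × Int × Int)) (out : List (String × Int)) : Decidable (Spec_compute_time_bounds n_jobs n_machines jobs p out) := by unfold Spec_compute_time_bounds; infer_instance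

-- ===== CLAIM (what is proved, stated in full; the proofs are below) =====
def Claim_equal_compute_time_bounds : Prop := ∀ (n_jobs : Int) (n_machines : Int) (jobs : List (List (Int × Int))) (p : List (Int × Int × Int)), Dom_compute_time_bounds n_jobs n_machines jobs p → Pre_compute_time_bounds n_jobs n_machines jobs p → Spec_compute_time_bounds n_jobs n_machines jobs p (compute_time_bounds n_jobs n_machines jobs p)

-- ===== LEMMAS AND PROOFS =====

-- the per-machine reference value: total duration of in-range jobs on machine m
def ctb_contrib (n_jobs m : Int) (p : List (Int × Int × Int)) : Int :=
  ((p.filter (fun e => decide (0 ≤ e.1 ∧ e.1 < n_jobs) && (e.2.1 == m))).map (fun e => e.2.2)).sum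

theorem ctb_match_eq (s : Int) (o : Option Int) :
    (match o with | some v => s + v | none => s) = s + o.getD 0 := by
  cases o <;> simp

theorem ctb_sum_indicator (R : List Int) (hR : R.Nodup) (a c : Int) :
    (R.map (fun j => if j = a then c else 0)).sum = if a ∈ R then c else 0 := by
  induction R with
  | nil => simp
  | cons x t ih =>
    simp only [List.nodup_cons] at hR
    simp only [List.map_cons, List.sum_cons, ih hR.2, List.mem_cons]
    by_cases hx : x = a
    · subst hx
      simp [hR.1]
    · simp [hx, Ne.symm hx]

theorem ctb_sum_lookup (R : List Int) (hR : R.Nodup) (m : Int)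
    (p : List (Int × Int × Int)) (hp : (p.map (fun e => (e.1, e.2.1))).Nodup) :
    (R.map (fun j => ((ctb_lookup p j m).getD 0))).sum
      = ((p.filter (fun e => decide (e.1 ∈ R) && (e.2.1 == m))).map (fun e => e.2.2)).sum := by
  induction p with
  | nil => simp [ctb_lookup]
  | cons e rest ih =>
    simp only [List.map_cons, List.nodup_cons] at hp
    obtain ⟨hk, hrest⟩ := hp
    by_cases hm : e.2.1 = m
    · have hnone : rest.find? (fun e' => e'.1 == e.1 && e'.2.1 == m) = none := by
        apply List.find?_eq_none.mpr
        intro x hx hbx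
        simp only [Bool.and_eq_true, beq_iff_eq] at hbx
        apply hk
        have hxe : (x.1, x.2.1) = (e.1, e.2.1) := by rw [hbx.1, hbx.2, hm]
        rw [← hxe]
        exact List.mem_map_of_mem hx
      have hpt : ∀ j ∈ R, (ctb_lookup (e :: rest) j m).getD 0
          = (if j = e.1 then e.2.2 else 0) + (ctb_lookup rest j m).getD 0 := by
        intro j _
        unfold ctb_lookup
        by_cases hj : j = e.1
        · subst hj
          rw [List.find?_cons_of_pos (by simp [hm])]
          simp [hnone]
        · rw [List.find?_cons_of_neg (by
            simp only [Bool.and_eq_true, beq_iff_eq, not_and]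
            intro h
            exact absurd h.symm hj)]
          simp [hj]
      rw [List.map_congr_left hpt, List.sum_map_add, ctb_sum_indicator R hR e.1 e.2.2,
        ih hrest, List.filter_cons]
      by_cases hcr : e.1 ∈ R <;> simp [hcr, hm]
    · have hpt : ∀ j ∈ R, (ctb_lookup (e :: rest) j m).getD 0 = (ctb_lookup rest j m).getD 0 := by
        intro j _
        unfold ctb_lookup
        rw [List.find?_cons_of_neg (by
          simp only [Bool.and_eq_true, beq_iff_eq, not_and]
          intro _
          exact hm)]
      rw [List.map_congr_left hpt, ih hrest, List.filter_cons]
      simp [hm]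

theorem ctb_innerA_eq (n_jobs m : Int) (p : List (Int × Int × Int))
    (hp : (p.map (fun e => (e.1, e.2.1))).Nodup) :
    (PySem.List.pyRange 0 n_jobs 1).foldl (fun s j =>
        match ctb_lookup p j m with
        | some v => s + v
        | none => s) 0 = ctb_contrib n_jobs m p := by
  rw [PySem.List.foldl_congr_mem' _ _ (fun s j => s + (ctb_lookup p j m).getD 0) 0
      (fun j _ acc => ctb_match_eq acc _)]
  rw [PySem.List.foldl_add, ctb_sum_lookup _ (PySem.List.nodup_pyRange_one 0 n_jobs) m p hp]
  have hf : (fun (e : Int × Int × Int) => decide (e.1 ∈ PySem.List.pyRange 0 n_jobs 1) && (e.2.1 == m))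
      = fun e => decide (0 ≤ e.1 ∧ e.1 < n_jobs) && (e.2.1 == m) := by
    funext e
    congr 1
    rw [decide_eq_decide]
    exact PySem.List.mem_pyRange_one
  rw [hf]
  unfold ctb_contrib
  omega

theorem ctb_load_getD (n_jobs n_machines m : Int) (hm : 0 ≤ m ∧ m < n_machines)
    (p : List (Int × Int × Int)) (d : PySem.Dict Int Int) :
    (p.foldl (fun d e =>
      if 0 ≤ e.1 ∧ e.1 < n_jobs ∧ 0 ≤ e.2.1 ∧ e.2.1 < n_machines then
        d.insert e.2.1 (d.getD e.2.1 0 + e.2.2)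
      else d) d).getD m 0 = d.getD m 0 + ctb_contrib n_jobs m p := by
  induction p generalizing d with
  | nil => simp [ctb_contrib]
  | cons e rest ih =>
    simp only [List.foldl_cons]
    by_cases hg : 0 ≤ e.1 ∧ e.1 < n_jobs ∧ 0 ≤ e.2.1 ∧ e.2.1 < n_machines
    · rw [if_pos hg, ih, PySem.Dict.getD_insert]
      unfold ctb_contrib
      rw [List.filter_cons]
      by_cases hme : m = e.2.1
      · subst hme
        have hc : (decide (0 ≤ e.1 ∧ e.1 < n_jobs) && (e.2.1 == e.2.1)) = true := by
          simp [hg.1, hg.2.1]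
        rw [if_pos hc, if_pos rfl]
        simp only [List.map_cons, List.sum_cons]
        omega
      · have hc : (decide (0 ≤ e.1 ∧ e.1 < n_jobs) && (e.2.1 == m)) = false := by
          have hb : (e.2.1 == m) = false := by
            simp only [beq_eq_false_iff_ne, ne_eq]
            intro h
            exact hme h.symm
          simp [hb]
        simp only [hc, Bool.false_eq_true, if_false, if_neg hme]
    · rw [if_neg hg, ih]
      unfold ctb_contrib
      rw [List.filter_cons]
      have hc : (decide (0 ≤ e.1 ∧ e.1 < n_jobs) && (e.2.1 == m)) = false := by
        by_cases hme : e.2.1 = m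
        · have hnj : ¬ (0 ≤ e.1 ∧ e.1 < n_jobs) := by
            intro hj
            exact hg ⟨hj.1, hj.2, by omega, by omega⟩
          simp [hnj]
        · have hb : (e.2.1 == m) = false := by
            simp only [beq_eq_false_iff_ne, ne_eq]
            exact hme
          simp [hb]
      simp only [hc, Bool.false_eq_true, if_false]

theorem ctb_jobs_eq (n_jobs : Int) (jobs : List (List (Int × Int)))
    (h1 : 0 ≤ n_jobs) (h2 : n_jobs ≤ (jobs.length : Int)) :
    (PySem.List.pyRange 0 n_jobs 1).map (fun j => ctb_rowSum ((PySem.List.pyGet? jobs j).getD []))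
      = (PySem.List.slice jobs (some 0) (some n_jobs)).map ctb_rowSum := by
  rw [PySem.List.slice_zero_start, PySem.List.slice_to jobs h1]
  apply List.ext_getElem
  · simp [PySem.List.length_pyRange_one]
    omega
  · intro i hi1 hi2
    simp only [List.length_map, PySem.List.length_pyRange_one] at hi1
    have hib : i < jobs.length := by omega
    simp only [List.getElem_map, PySem.List.getElem_pyRange_one, zero_add]
    rw [PySem.List.pyGet?_natCast, List.getElem?_eq_getElem hib]
    simp [List.getElem_take]

-- ===== VERDICT (by name: the statement is the Claim_ definition above) =====
theorem compute_time_bounds_spec : Claim_equal_compute_time_bounds := by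
  intro n_jobs n_machines jobs p _hdom hpre
  obtain ⟨h1, h2, hnod⟩ := hpre
  have hjob := ctb_jobs_eq n_jobs jobs (by omega) h2
  have hA : ∀ m ∈ PySem.List.pyRange 0 n_machines 1, ∀ acc : Int,
      max acc ((PySem.List.pyRange 0 n_jobs 1).foldl (fun s j =>
        match ctb_lookup p j m with
        | some v => s + v
        | none => s) 0) = max acc (ctb_contrib n_jobs m p) := by
    intro m _ acc
    rw [ctb_innerA_eq n_jobs m p hnod]
  have hB : ∀ m ∈ PySem.List.pyRange 0 n_machines 1, ∀ acc : Int,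
      max acc ((ctb_load n_jobs n_machines p).getD m 0) = max acc (ctb_contrib n_jobs m p) := by
    intro m hm acc
    have hmr := PySem.List.mem_pyRange_one.mp hm
    unfold ctb_load
    rw [ctb_load_getD n_jobs n_machines m hmr p PySem.Dict.empty]
    simp [PySem.Dict.getD, PySem.Dict.get?, PySem.Dict.empty]
  have hmmlA := PySem.List.foldl_congr_mem' (PySem.List.pyRange 0 n_machines 1) _
      (fun acc m => max acc (ctb_contrib n_jobs m p)) 0 hA
  have hmmlB := PySem.List.foldl_congr_mem' (PySem.List.pyRange 0 n_machines 1) _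
      (fun acc m => max acc (ctb_contrib n_jobs m p)) 0 hB
  unfold Spec_compute_time_bounds
  apply Eq.trans (b :=
    [("lower_bound", max
        ((PySem.List.max? ((PySem.List.slice jobs (some 0) (some n_jobs)).map ctb_rowSum) (fun x => x)).getD 0)
        ((PySem.List.pyRange 0 n_machines 1).foldl (fun acc m => max acc (ctb_contrib n_jobs m p)) 0)),
     ("upper_bound", (p.map (fun e => e.2.2)).sum),
     ("big_M", (p.map (fun e => e.2.2)).sum),
     ("tighter_big_M", if p ≠ [] then (p.map (fun e => e.2.2)).sum - (PySem.List.min? (p.map (fun e => e.2.2)) (fun x => x)).getD 0 else (p.map (fun e => e.2.2)).sum),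
     ("max_job_length", (PySem.List.max? ((PySem.List.slice jobs (some 0) (some n_jobs)).map ctb_rowSum) (fun x => x)).getD 0),
     ("max_machine_load", (PySem.List.pyRange 0 n_machines 1).foldl (fun acc m => max acc (ctb_contrib n_jobs m p)) 0)])
  · show
      [("lower_bound", max
          ((PySem.List.max? ((PySem.List.pyRange 0 n_jobs 1).map (fun j => ctb_rowSum ((PySem.List.pyGet? jobs j).getD []))) (fun x => x)).getD 0)
          ((PySem.List.pyRange 0 n_machines 1).foldl (fun acc m =>
            max acc ((PySem.List.pyRange 0 n_jobs 1).foldl (fun s j =>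
              match ctb_lookup p j m with
              | some v => s + v
              | none => s) 0)) 0)),
       ("upper_bound", (p.map (fun e => e.2.2)).sum),
       ("big_M", (p.map (fun e => e.2.2)).sum),
       ("tighter_big_M", if p ≠ [] then (p.map (fun e => e.2.2)).sum - (PySem.List.min? (p.map (fun e => e.2.2)) (fun x => x)).getD 0 else (p.map (fun e => e.2.2)).sum),
       ("max_job_length", (PySem.List.max? ((PySem.List.pyRange 0 n_jobs 1).map (fun j => ctb_rowSum ((PySem.List.pyGet? jobs j).getD []))) (fun x => x)).getD 0),
       ("max_machine_load", (PySem.List.pyRange 0 n_machines 1).foldl (fun acc m =>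
          max acc ((PySem.List.pyRange 0 n_jobs 1).foldl (fun s j =>
            match ctb_lookup p j m with
            | some v => s + v
            | none => s) 0)) 0)] = _
    rw [hjob, hmmlA]
  · rw [← hmmlB]
    rfl
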